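-- pv_equiv track=rewrite | github.com/ksyjerry/fs_recon | parsers/dsd_to_json.py | _build_header_paths
-- ===== SOURCE A (Python) =====
-- def _build_header_paths(header_matrix):
--     max_rows = len(header_matrix)
--     if max_rows == 0:
--         return []
--
--     max_cols = max(len(row) for row in header_matrix)
--     column_paths = [[] for _ in range(max_cols)]
--
--     for r in range(max_rows):
--         for c in range(max_cols):
--             cell = header_matrix[r][c]
--             if cell is None:
--                 continue
--             text, rs, cs = cell
--             if not column_paths[c] or column_paths[c][-1] != text:
--                 column_paths[c].append(text)
--
--     return column_paths
-- ===== SOURCE B (Python) =====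
-- def _prepend(cell, tail):
--     if cell is None:
--         return tail
--     text = cell[0]
--     if tail and tail[0] == text:
--         return tail
--     return [text] + tail
--
--
-- def _build_header_paths(header_matrix):
--     if not header_matrix:
--         return []
--     width = max(map(len, header_matrix))
--     paths = [[]] * width
--     for row in reversed(header_matrix):
--         paths = [_prepend(cell, tail) for cell, tail in zip(row, paths)]
--     return paths
-- ===== Notes on version B (the rewrite author's own statement) =====
-- stated objective: alternative
-- what changed: Builds the result back-to-front: a right-to-left fold over the rows merges each row's cells into the already-built suffix paths (prepending a text unless it equals the current head), replacing A's forward nested index loops with mutable per-column last-appended state.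
import Mathlib
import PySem

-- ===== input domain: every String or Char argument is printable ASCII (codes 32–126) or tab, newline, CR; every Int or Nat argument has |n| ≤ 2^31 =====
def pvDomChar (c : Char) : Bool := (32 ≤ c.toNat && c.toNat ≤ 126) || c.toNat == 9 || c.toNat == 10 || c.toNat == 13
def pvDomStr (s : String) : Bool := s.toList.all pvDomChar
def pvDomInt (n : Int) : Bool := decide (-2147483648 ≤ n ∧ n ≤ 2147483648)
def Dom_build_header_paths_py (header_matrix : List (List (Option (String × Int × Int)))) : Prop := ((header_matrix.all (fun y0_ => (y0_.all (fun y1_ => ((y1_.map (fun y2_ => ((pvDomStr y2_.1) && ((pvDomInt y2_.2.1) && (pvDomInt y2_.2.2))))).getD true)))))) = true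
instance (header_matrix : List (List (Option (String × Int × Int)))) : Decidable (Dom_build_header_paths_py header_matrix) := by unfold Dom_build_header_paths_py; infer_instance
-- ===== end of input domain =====

-- B builds the result back-to-front: a right fold over the rows merges each row into the
-- already-built suffix paths (prepend unless equal to the head), instead of A's forward nested
-- index loops with per-column last-appended dedup state.


-- ===== PORT A =====
-- A's inner-loop body for one column index c of the current row.  `row.getD c none` is exact on
-- Pre_ (rectangular matrices): Python's header_matrix[r][c] raises IndexError on shorter rows,
-- which Pre_build_header_paths_py excludes.
def pvStepA (row : List (Option (String × Int × Int))) (cps : List (List String)) (c : Nat) : List (List String) :=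
  match row.getD c none with
  | none => cps
  | some (text, _, _) =>
    let col := cps.getD c []
    if col = [] ∨ col.getLast? ≠ some text then cps.set c (col ++ [text]) else cps

def build_header_paths_py (header_matrix : List (List (Option (String × Int × Int)))) : List (List String) :=
  if header_matrix.length = 0 then []
  else
    -- max(len(row) for row in header_matrix): foldl Nat.max 0 is exact for a nonempty list of lengths
    let max_cols := (header_matrix.map List.length).foldl Nat.max 0
    header_matrix.foldl (fun cps row => (List.range max_cols).foldl (pvStepA row) cps)
      (List.replicate max_cols [])

-- ===== PORT B =====
-- Source B's helper `_prepend`: prepend the cell's text unless the built path already starts with it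
def pvPrepend (cell : Option (String × Int × Int)) (tail : List String) : List String :=
  match cell with
  | none => tail
  | some (text, _, _) => if tail.head? = some text then tail else text :: tail

def build_header_paths_py_alt (header_matrix : List (List (Option (String × Int × Int)))) : List (List String) :=
  if header_matrix = [] then []
  else
    let width := (header_matrix.map List.length).foldl Nat.max 0
    -- `for row in reversed(...)` rebuilding `paths` = foldl over the reversed list
    header_matrix.reverse.foldl
      (fun paths row => (row.zip paths).map (fun p => pvPrepend p.1 p.2))
      (List.replicate width [])

-- ===== PRECONDITION & SPEC =====
-- Pre_ excludes ragged matrices (rows of different lengths): there Python A raises IndexError at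
-- header_matrix[r][c] for a row shorter than the widest one.
def Pre_build_header_paths_py (header_matrix : List (List (Option (String × Int × Int)))) : Prop :=
  ∀ r1 ∈ header_matrix, ∀ r2 ∈ header_matrix, r1.length = r2.length
instance (header_matrix : List (List (Option (String × Int × Int)))) : Decidable (Pre_build_header_paths_py header_matrix) := by unfold Pre_build_header_paths_py; infer_instance

def pvWitness_build_header_paths_py : (List (List (Option (String × Int × Int)))) :=
  [[some ("A", 1, 1), none], [some ("A", 1, 1), some ("B", 1, 1)]]

def Spec_build_header_paths_py (header_matrix : List (List (Option (String × Int × Int)))) (out : List (List String)) : Prop := out = build_header_paths_py_alt header_matrix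
instance (header_matrix : List (List (Option (String × Int × Int)))) (out : List (List String)) : Decidable (Spec_build_header_paths_py header_matrix out) := by unfold Spec_build_header_paths_py; infer_instance

-- ===== CLAIM (what is proved, stated in full; the proofs are below) =====
def Claim_equal_build_header_paths_py : Prop := ∀ (header_matrix : List (List (Option (String × Int × Int)))), Dom_build_header_paths_py header_matrix → Pre_build_header_paths_py header_matrix → Spec_build_header_paths_py header_matrix (build_header_paths_py header_matrix)

-- ===== LEMMAS AND PROOFS =====

-- dedup-append: the step A performs on one column's path for one non-None cell
def pvDA (col : List String) (t : String) : List String :=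
  if col = [] ∨ col.getLast? ≠ some t then col ++ [t] else col

-- what one cell does to one column's path (A side)
def pvCellStep (col : List String) (cell : Option (String × Int × Int)) : List String :=
  match cell with
  | none => col
  | some (t, _, _) => pvDA col t

-- collapse of consecutive duplicates, carrying the previous element
def pvF (prev : Option String) : List String → List String
  | [] => []
  | t :: ts => if some t ≠ prev then t :: pvF (some t) ts else pvF (some t) ts

-- collapse built from the right, by prepending
def pvG : List String → List String
  | [] => []
  | t :: ts => if (pvG ts).head? = some t then pvG ts else t :: pvG ts

lemma pvF_cons (prev : Option String) (t : String) (ts : List String) :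
    pvF prev (t :: ts) = if some t ≠ prev then t :: pvF (some t) ts else pvF (some t) ts := rfl

lemma pvStepA_length (row : List (Option (String × Int × Int))) (cps : List (List String))
    (c : Nat) : (pvStepA row cps c).length = cps.length := by
  unfold pvStepA
  cases h : row.getD c none with
  | none => rfl
  | some cell =>
    obtain ⟨t, rs, cs⟩ := cell
    dsimp only
    split_ifs <;> simp [List.length_set]

lemma pvStepA_getD (row : List (Option (String × Int × Int))) (cps : List (List String))
    (c c' : Nat) :
    (pvStepA row cps c).getD c' [] =
      if c' = c ∧ c < cps.length then pvCellStep (cps.getD c []) (row.getD c none)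
      else cps.getD c' [] := by
  unfold pvStepA pvCellStep
  cases h : row.getD c none with
  | none =>
    dsimp only
    split_ifs with hc
    · exact congrArg (fun i => cps.getD i []) hc.1
    · rfl
  | some cell =>
    obtain ⟨t, rs, cs⟩ := cell
    dsimp only
    by_cases hcond : cps.getD c [] = [] ∨ (cps.getD c []).getLast? ≠ some t
    · rw [if_pos hcond]
      by_cases hc : c' = c ∧ c < cps.length
      · obtain ⟨rfl, hlt⟩ := hc
        rw [if_pos ⟨rfl, hlt⟩]
        unfold pvDA
        rw [if_pos hcond]
        simp [List.getD_eq_getElem?_getD, List.getElem?_set_self hlt]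
      · rw [if_neg hc]
        by_cases hlt : c < cps.length
        · have hne : c ≠ c' := fun e => hc ⟨e.symm, hlt⟩
          simp [List.getD_eq_getElem?_getD, List.getElem?_set_ne hne]
        · rw [List.set_eq_of_length_le (Nat.le_of_not_lt hlt)]
    · rw [if_neg hcond]
      split_ifs with hc
      · obtain ⟨rfl, _⟩ := hc
        unfold pvDA
        rw [if_neg hcond]
      · rfl

lemma pv_inner (row : List (Option (String × Int × Int))) (n : Nat)
    (cps : List (List String)) :
    ((List.range n).foldl (pvStepA row) cps).length = cps.length ∧
    ∀ c : Nat, ((List.range n).foldl (pvStepA row) cps).getD c [] =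
      if c < n ∧ c < cps.length then pvCellStep (cps.getD c []) (row.getD c none)
      else cps.getD c [] := by
  induction n with
  | zero =>
    refine ⟨rfl, fun c => ?_⟩
    simp
  | succ n ih =>
    obtain ⟨hlen, hget⟩ := ih
    rw [List.range_succ, List.foldl_append]
    simp only [List.foldl_cons, List.foldl_nil]
    refine ⟨by rw [pvStepA_length, hlen], fun c => ?_⟩
    rw [pvStepA_getD, hlen]
    by_cases hc : c = n ∧ n < cps.length
    · obtain ⟨rfl, hlt⟩ := hc
      rw [if_pos ⟨rfl, hlt⟩, if_pos ⟨Nat.lt_succ_self c, hlt⟩]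
      congr 1
      have h := hget c
      rw [if_neg (by omega)] at h
      exact h
    · rw [if_neg hc, hget c]
      by_cases h2 : c < n ∧ c < cps.length
      · rw [if_pos h2, if_pos ⟨by omega, h2.2⟩]
      · rw [if_neg h2, if_neg (by omega)]

lemma pv_outer (n : Nat) (m : List (List (Option (String × Int × Int))))
    (cps : List (List String)) :
    ((m.foldl (fun cps row => (List.range n).foldl (pvStepA row) cps) cps)).length = cps.length ∧
    ∀ c : Nat, ((m.foldl (fun cps row => (List.range n).foldl (pvStepA row) cps) cps)).getD c [] =
      if c < n ∧ c < cps.length then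
        m.foldl (fun col row => pvCellStep col (row.getD c none)) (cps.getD c [])
      else cps.getD c [] := by
  induction m generalizing cps with
  | nil =>
    refine ⟨rfl, fun c => ?_⟩
    split_ifs <;> rfl
  | cons row m ih =>
    obtain ⟨ilen, iget⟩ := pv_inner row n cps
    obtain ⟨olen, oget⟩ := ih ((List.range n).foldl (pvStepA row) cps)
    simp only [List.foldl_cons]
    refine ⟨by rw [olen, ilen], fun c => ?_⟩
    rw [oget c, ilen, iget c]
    split_ifs with h
    · rfl
    · rfl

lemma pv_col (c : Nat) (m : List (List (Option (String × Int × Int)))) (col : List String) :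
    m.foldl (fun col row => pvCellStep col (row.getD c none)) col
    = (m.filterMap (fun row => (row.getD c none).map (fun p => p.1))).foldl pvDA col := by
  induction m generalizing col with
  | nil => rfl
  | cons row m ih =>
    cases h : row.getD c none with
    | none =>
      simp only [List.foldl_cons, List.filterMap_cons, h, Option.map_none, pvCellStep]
      exact ih col
    | some cell =>
      obtain ⟨t, rs, cs⟩ := cell
      simp only [List.foldl_cons, List.filterMap_cons, h, Option.map_some, pvCellStep]
      exact ih (pvDA col t)

lemma pv_L1 (ts : List String) (acc : List String) :
    ts.foldl pvDA acc = acc ++ pvF acc.getLast? ts := by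
  induction ts generalizing acc with
  | nil => simp [pvF]
  | cons t ts ih =>
    rw [List.foldl_cons]
    by_cases h : acc = [] ∨ acc.getLast? ≠ some t
    · rw [show pvDA acc t = acc ++ [t] from by unfold pvDA; rw [if_pos h]]
      rw [ih, List.getLast?_concat]
      have hne : some t ≠ acc.getLast? := by
        rcases h with h | h
        · subst h; simp
        · exact fun e => h e.symm
      rw [pvF_cons, if_pos hne]
      simp
    · rw [show pvDA acc t = acc from by unfold pvDA; rw [if_neg h]]
      have hl : acc.getLast? = some t := by
        by_contra hcontra
        exact h (Or.inr hcontra)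
      rw [ih, hl, pvF_cons, if_neg (by simp)]

-- right-built collapse equals left-carried collapse
lemma pv_G_cons (t : String) (ts : List String) : pvG (t :: ts) = t :: pvF (some t) ts := by
  induction ts generalizing t with
  | nil => rfl
  | cons u ts ih =>
    show (if (pvG (u :: ts)).head? = some t then pvG (u :: ts) else t :: pvG (u :: ts)) = _
    rw [ih u]
    simp only [List.head?_cons]
    by_cases h : u = t
    · subst h
      rw [if_pos rfl, pvF_cons, if_neg (by simp)]
    · rw [if_neg (by simpa using h), pvF_cons, if_pos (by simpa using h)]

lemma pv_G_eq_F (ts : List String) : pvG ts = pvF none ts := by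
  cases ts with
  | nil => rfl
  | cons t ts => rw [pv_G_cons, pvF_cons, if_pos (by simp)]

-- B's step on one row, per column
lemma pvB_step (row : List (Option (String × Int × Int))) (paths : List (List String))
    (hr : paths.length ≤ row.length) :
    ((row.zip paths).map (fun p => pvPrepend p.1 p.2)).length = paths.length ∧
    ∀ c : Nat, c < paths.length →
      ((row.zip paths).map (fun p => pvPrepend p.1 p.2)).getD c []
        = pvPrepend (row.getD c none) (paths.getD c []) := by
  refine ⟨by simp [List.length_zip]; omega, fun c hc => ?_⟩
  have hcr : c < row.length := lt_of_lt_of_le hc hr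
  have hz : c < (row.zip paths).length := by simp [List.length_zip]; omega
  rw [List.getD_eq_getElem?_getD, List.getElem?_map,
    List.getElem?_eq_getElem hz, List.getElem_zip]
  simp [List.getD_eq_getElem?_getD, List.getElem?_eq_getElem hcr, List.getElem?_eq_getElem hc]

-- B's whole fold (stated as a foldr over the rows), per column
lemma pvB_fold (w : Nat) (m : List (List (Option (String × Int × Int))))
    (hm : ∀ row ∈ m, row.length = w) :
    (m.foldr (fun row paths => (row.zip paths).map (fun p => pvPrepend p.1 p.2))
        (List.replicate w [])).length = w ∧
    ∀ c : Nat, c < w →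
      (m.foldr (fun row paths => (row.zip paths).map (fun p => pvPrepend p.1 p.2))
          (List.replicate w [])).getD c []
        = m.foldr (fun row tail => pvPrepend (row.getD c none) tail) [] := by
  induction m with
  | nil =>
    refine ⟨List.length_replicate, fun c hc => ?_⟩
    simp [List.getD_eq_getElem?_getD, hc]
  | cons row m ih =>
    obtain ⟨ilen, iget⟩ := ih (fun r hr => hm r (List.mem_cons_of_mem _ hr))
    have hrw : row.length = w := hm row List.mem_cons_self
    simp only [List.foldr_cons]
    obtain ⟨slen, sget⟩ := pvB_step row _ (by rw [ilen, hrw])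
    refine ⟨by rw [slen, ilen], fun c hc => ?_⟩
    rw [sget c (by rw [ilen]; exact hc), iget c hc]

-- B's per-column foldr is the right-built collapse of the column's texts
lemma pv_colB (c : Nat) (m : List (List (Option (String × Int × Int)))) :
    m.foldr (fun row tail => pvPrepend (row.getD c none) tail) []
    = pvG (m.filterMap (fun row => (row.getD c none).map (fun p => p.1))) := by
  induction m with
  | nil => rfl
  | cons row m ih =>
    cases h : row.getD c none with
    | none =>
      simp only [List.foldr_cons, List.filterMap_cons, h, Option.map_none]
      exact ih
    | some cell =>
      obtain ⟨t, rs, cs⟩ := cell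
      simp only [List.foldr_cons, List.filterMap_cons, h, Option.map_some]
      rw [ih]
      rfl

-- on a nonempty rectangular matrix, the fold of max over the lengths is the common length
lemma pv_width (m : List (List (Option (String × Int × Int)))) (L : Nat)
    (hm : ∀ row ∈ m, row.length = L) (hne : m ≠ []) :
    (m.map List.length).foldl Nat.max 0 = L := by
  have aux : ∀ (l : List (List (Option (String × Int × Int)))),
      (∀ row ∈ l, row.length = L) → (l.map List.length).foldl Nat.max L = L := by
    intro l
    induction l with
    | nil => intro _; rfl
    | cons r l ih =>
      intro h
      simp only [List.map_cons, List.foldl_cons, h r List.mem_cons_self, Nat.max_self]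
      exact ih (fun x hx => h x (List.mem_cons_of_mem _ hx))
  cases m with
  | nil => exact absurd rfl hne
  | cons r m =>
    simp only [List.map_cons, List.foldl_cons, Nat.zero_max, hm r List.mem_cons_self]
    exact aux m (fun x hx => hm x (List.mem_cons_of_mem _ hx))

-- ===== VERDICT (by name: the statement is the Claim_ definition above) =====
theorem build_header_paths_py_spec : Claim_equal_build_header_paths_py := by
  intro m _ hpre
  unfold Spec_build_header_paths_py build_header_paths_py build_header_paths_py_alt
  by_cases hm : m = []
  · subst hm; rfl
  · have hm' : ¬ (m.length = 0) := by simpa [List.length_eq_zero_iff] using hm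
    rw [if_neg hm', if_neg hm]
    obtain ⟨r0, m', rfl⟩ : ∃ r0 m', m = r0 :: m' := by
      cases m with
      | nil => exact absurd rfl hm
      | cons a b => exact ⟨a, b, rfl⟩
    set m := r0 :: m'
    have hrect : ∀ row ∈ m, row.length = r0.length :=
      fun row hr => hpre row hr r0 List.mem_cons_self
    have hwidth : (m.map List.length).foldl Nat.max 0 = r0.length :=
      pv_width m r0.length hrect hm
    set w := (m.map List.length).foldl Nat.max 0 with hwdef
    rw [List.foldl_reverse]
    obtain ⟨olen, oget⟩ := pv_outer w m (List.replicate w ([] : List String))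
    obtain ⟨blen, bget⟩ := pvB_fold w m (by rw [hwidth]; exact hrect)
    have hlenA : (m.foldl (fun cps row => (List.range w).foldl (pvStepA row) cps)
        (List.replicate w ([] : List String))).length = w := by
      rw [olen, List.length_replicate]
    have hlenB : (m.foldr (fun row paths => (row.zip paths).map (fun p => pvPrepend p.1 p.2))
        (List.replicate w ([] : List String))).length = w := blen
    apply List.ext_getElem
    · rw [hlenA, hlenB]
    intro i hiA hiB
    have hi : i < w := by rw [hlenA] at hiA; exact hiA
    have hv := oget i
    rw [if_pos ⟨hi, by rw [List.length_replicate]; exact hi⟩] at hv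
    rw [show (List.replicate w ([] : List String)).getD i [] = [] from by
      simp [List.getD_eq_getElem?_getD, hi]] at hv
    rw [pv_col, pv_L1] at hv
    simp only [List.getLast?_nil, List.nil_append] at hv
    have hb := bget i hi
    rw [pv_colB, pv_G_eq_F] at hb
    rw [← List.getD_eq_getElem (d := ([] : List String)), ← List.getD_eq_getElem (d := ([] : List String)), hv, hb]
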